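-- pv_equiv track=rewrite | github.com/jonzim-cmd/kura-training | workers/src/kura_workers/utils.py | separate_known_unknown
-- ===== SOURCE A (Python) =====
-- from typing import Any
--
-- def separate_known_unknown(
--     data: dict[str, Any], known_fields: set[str]
-- ) -> tuple[dict[str, Any], dict[str, Any]]:
--     """Split event data into known (handler-processed) and unknown (passthrough) fields.
--
--     Returns (known, unknown). Unknown fields are preserved in projections
--     so the agent can access them even if no handler logic exists yet.
--     """
--     known: dict[str, Any] = {}
--     unknown: dict[str, Any] = {}
--     for key, value in data.items():
--         if key in known_fields:
--             known[key] = value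
--         else:
--             unknown[key] = value
--     return known, unknown
-- ===== SOURCE B (Python) =====
-- def separate_known_unknown(data, known_fields):
--     """Split event data into known and unknown fields via set algebra on the keys."""
--     keys = data.keys()
--     known_keys = keys & known_fields
--     unknown_keys = keys - known_fields
--     known = {k: data[k] for k in known_keys}
--     unknown = {k: data[k] for k in unknown_keys}
--     return known, unknown
-- ===== Notes on version B (the rewrite author's own statement) =====
-- stated objective: alternative
-- what changed: B partitions the key set first via set algebra (keys & known_fields, keys - known_fields) and then builds each dict by key lookup, instead of A's single pass over the items that branches on membership per item.
import Mathlib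
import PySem

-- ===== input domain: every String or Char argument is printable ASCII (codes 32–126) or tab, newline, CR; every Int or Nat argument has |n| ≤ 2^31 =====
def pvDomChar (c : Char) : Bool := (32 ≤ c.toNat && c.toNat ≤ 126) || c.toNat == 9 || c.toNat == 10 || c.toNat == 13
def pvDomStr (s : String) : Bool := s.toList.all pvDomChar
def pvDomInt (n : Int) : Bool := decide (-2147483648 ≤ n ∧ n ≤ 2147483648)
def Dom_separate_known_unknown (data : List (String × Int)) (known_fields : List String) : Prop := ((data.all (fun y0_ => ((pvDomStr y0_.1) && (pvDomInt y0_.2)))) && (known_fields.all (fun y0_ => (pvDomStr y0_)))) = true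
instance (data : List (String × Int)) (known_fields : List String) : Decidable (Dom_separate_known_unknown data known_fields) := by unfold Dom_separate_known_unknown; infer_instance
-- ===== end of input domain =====

-- B derives the partition by set algebra on the key sets and then looks the values up,
-- instead of A's single loop that branches per item; objective: alternative (same cost).

-- ===== PORT A =====
-- A: one pass over data.items(), inserting each pair into `known` or `unknown`
-- depending on membership of the key in known_fields.
def separate_known_unknown (data : List (String × Int)) (known_fields : List String) : (List (String × Int)) × (List (String × Int)) :=
  let r := data.foldl
    (fun (st : PySem.Dict String Int × PySem.Dict String Int) kv =>
      if PySem.Set.contains known_fields kv.1 then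
        (st.1.insert kv.1 kv.2, st.2)
      else
        (st.1, st.2.insert kv.1 kv.2))
    (PySem.Dict.empty, PySem.Dict.empty)
  (r.1.items, r.2.items)

-- ===== PORT B =====
-- B: known_keys = data.keys() & known_fields, unknown_keys = data.keys() - known_fields,
-- then each result dict is built by looking the keys up in data.
-- (data[k] is ported as getD k 0: every k comes from data.keys(), so the lookup never misses;
-- Python iterates the key sets in hash order, the resulting dicts are order-insensitive values.)
def separate_known_unknown_alt (data : List (String × Int)) (known_fields : List String) : (List (String × Int)) × (List (String × Int)) :=
  let d := PySem.Dict.ofList data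
  let keys := d.keys
  let knownKeys := PySem.Set.inter keys known_fields
  let unknownKeys := PySem.Set.diff keys known_fields
  (knownKeys.map (fun k => (k, d.getD k 0)), unknownKeys.map (fun k => (k, d.getD k 0)))

-- ===== PRECONDITION & SPEC =====
def Spec_separate_known_unknown (data : List (String × Int)) (known_fields : List String) (out : (List (String × Int)) × (List (String × Int))) : Prop := out = separate_known_unknown_alt data known_fields
instance (data : List (String × Int)) (known_fields : List String) (out : (List (String × Int)) × (List (String × Int))) : Decidable (Spec_separate_known_unknown data known_fields out) := by unfold Spec_separate_known_unknown; infer_instance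

-- ===== CLAIM (what is proved, stated in full; the proofs are below) =====
def Claim_equal_separate_known_unknown : Prop := ∀ (data : List (String × Int)) (known_fields : List String), Dom_separate_known_unknown data known_fields → Spec_separate_known_unknown data known_fields (separate_known_unknown data known_fields)

-- ===== LEMMAS AND PROOFS =====

-- A's fold over a pair of dicts is the pair of the two independent folds.
theorem sku_foldl_pair (p : String → Bool) :
    ∀ (data : List (String × Int)) (d1 d2 : PySem.Dict String Int),
      data.foldl
        (fun (st : PySem.Dict String Int × PySem.Dict String Int) kv =>
          if p kv.1 then (st.1.insert kv.1 kv.2, st.2) else (st.1, st.2.insert kv.1 kv.2))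
        (d1, d2)
      = (data.foldl (fun d kv => if p kv.1 then d.insert kv.1 kv.2 else d) d1,
         data.foldl (fun d kv => if p kv.1 then d else d.insert kv.1 kv.2) d2) := by
  intro data
  induction data with
  | nil => intro d1 d2; rfl
  | cons kv rest ih =>
      intro d1 d2
      by_cases h : p kv.1 = true
      · simp [List.foldl_cons, h, ih]
      · simp only [Bool.not_eq_true] at h
        simp [List.foldl_cons, h, ih]

-- The filtering fold into a fresh dict has exactly the items of the full dict
-- restricted to the keys satisfying p.
theorem sku_items_foldl_filter (p : String → Bool) (data : List (String × Int)) :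
    (data.foldl (fun (d : PySem.Dict String Int) kv => if p kv.1 then d.insert kv.1 kv.2 else d)
      PySem.Dict.empty).items
    = ((PySem.Dict.ofList data).keys.filter p).map
        (fun k => (k, (PySem.Dict.ofList data).getD k 0)) := by
  induction data using List.reverseRecOn with
  | nil => rfl
  | append_singleton xs x ih =>
      obtain ⟨k, v⟩ := x
      have hD : PySem.Dict.ofList (xs ++ [(k, v)]) = (PySem.Dict.ofList xs).insert k v := by
        simp [PySem.Dict.ofList, PySem.Dict.update, List.foldl_append]
      set D := PySem.Dict.ofList xs with hDdef
      set F := xs.foldl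
          (fun (d : PySem.Dict String Int) kv => if p kv.1 then d.insert kv.1 kv.2 else d)
          PySem.Dict.empty with hFdef
      have hFkeys : F.keys = D.keys.filter p := by
        simp [PySem.Dict.keys, ih, List.map_map, Function.comp_def]
      rw [List.foldl_append, List.foldl_cons, List.foldl_nil, hD]
      by_cases hp : p k = true
      · -- the new pair goes to this dict
        simp only [hp, if_pos]
        by_cases hc : D.contains k = true
        · -- k already present: insert overwrites in place on both sides
          have hFk : F.contains k = true := by
            rw [PySem.Dict.contains_iff_mem_keys, hFkeys]
            rw [PySem.Dict.contains_iff_mem_keys] at hc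
            exact List.mem_filter.mpr ⟨hc, hp⟩
          rw [PySem.Dict.keys_insert_of_contains D v hc,
              PySem.Dict.items_insert_of_contains F v hFk, ih, List.map_map]
          apply List.map_congr_left
          intro k' _
          by_cases hk : k' = k
          · subst hk
            simp
          · simp [Function.comp, hk, PySem.Dict.getD_insert_of_ne _ _ _ hk]
        · -- fresh key: appended on both sides
          have hc' : D.contains k = false := by simpa using hc
          have hFk : F.contains k = false := by
            rw [Bool.eq_false_iff]
            intro hck
            rw [PySem.Dict.contains_iff_mem_keys, hFkeys] at hck
            rw [Bool.eq_false_iff] at hc'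
            exact hc' (by rw [PySem.Dict.contains_iff_mem_keys]; exact (List.mem_filter.mp hck).1)
          rw [PySem.Dict.keys_insert_of_not_contains D v hc',
              PySem.Dict.items_insert_of_not_contains F v hFk, ih]
          rw [List.filter_append, List.map_append]
          have hnotmem : k ∉ D.keys := by
            rw [Bool.eq_false_iff] at hc'
            intro hm; exact hc' (by rw [PySem.Dict.contains_iff_mem_keys]; exact hm)
          have h2 : List.map (fun k' => (k', (D.insert k v).getD k' 0)) (List.filter p [k])
              = [(k, v)] := by
            simp [hp, PySem.Dict.getD_insert]
          have h1 : List.map (fun k' => (k', (D.insert k v).getD k' 0)) (List.filter p D.keys)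
              = List.map (fun k' => (k', D.getD k' 0)) (List.filter p D.keys) := by
            apply List.map_congr_left
            intro k' hk'
            have hne : k' ≠ k := fun h => hnotmem (h ▸ (List.mem_filter.mp hk').1)
            simp [PySem.Dict.getD_insert_of_ne D v 0 hne]
          rw [h1, h2]
      · -- the new pair goes to the other dict: this dict unchanged
        simp only [Bool.not_eq_true] at hp
        simp only [hp, Bool.false_eq_true, if_false]
        rw [ih]
        by_cases hc : D.contains k = true
        · rw [PySem.Dict.keys_insert_of_contains D v hc]
          apply List.map_congr_left
          intro k' hk'
          have hpk' : p k' = true := (List.mem_filter.mp hk').2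
          have : k' ≠ k := fun h => by rw [h, hp] at hpk'; exact Bool.false_ne_true hpk'
          simp [PySem.Dict.getD_insert_of_ne D v 0 this]
        · have hc' : D.contains k = false := by simpa using hc
          rw [PySem.Dict.keys_insert_of_not_contains D v hc']
          rw [List.filter_append]
          simp only [List.filter_cons, hp, Bool.false_eq_true, if_false, List.filter_nil,
            List.append_nil]
          apply List.map_congr_left
          intro k' hk'
          have hnotmem : k ∉ D.keys := by
            rw [Bool.eq_false_iff] at hc'
            intro hm; exact hc' (by rw [PySem.Dict.contains_iff_mem_keys]; exact hm)
          have : k' ≠ k := fun h => hnotmem (h ▸ (List.mem_filter.mp hk').1)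
          simp [PySem.Dict.getD_insert_of_ne D v 0 this]

-- The `unknown` fold is the filtering fold for the negated predicate.
theorem sku_neg_fold (p : String → Bool) (data : List (String × Int)) :
    data.foldl (fun (d : PySem.Dict String Int) kv => if p kv.1 then d else d.insert kv.1 kv.2)
      PySem.Dict.empty
    = data.foldl (fun (d : PySem.Dict String Int) kv => if !p kv.1 then d.insert kv.1 kv.2 else d)
      PySem.Dict.empty := by
  apply PySem.List.foldl_congr_mem
  intro d kv _
  cases h : p kv.1 <;> simp

-- ===== VERDICT (by name: the statement is the Claim_ definition above) =====
theorem separate_known_unknown_spec : Claim_equal_separate_known_unknown := by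
  intro data known_fields _
  unfold Spec_separate_known_unknown separate_known_unknown separate_known_unknown_alt
  rw [sku_foldl_pair]
  refine Prod.ext ?_ ?_
  · simpa [PySem.Set.inter, PySem.Set.contains]
      using sku_items_foldl_filter (fun k => PySem.Set.contains known_fields k) data
  · rw [sku_neg_fold]
    simpa [PySem.Set.diff, PySem.Set.contains]
      using sku_items_foldl_filter (fun k => !PySem.Set.contains known_fields k) data
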